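-- pv_equiv track=rewrite | github.com/eunchae2000/algorithm_test | study/완전탐색/모의고사.py | solution
-- ===== SOURCE A (Python) =====
-- def solution(answers):
--     answer = []
--     one = [1, 2, 3, 4, 5]
--     two = [2, 1, 2, 3, 2, 4, 2, 5]
--     three = [3, 3, 1, 1, 2, 2, 4, 4, 5, 5]
--
--     score = [0, 0, 0]
--
--     for i, result in enumerate(answers):
--         if one[i%5] == result:
--             score[0] += 1
--         if two[i%8] == result:
--             score[1] += 1
--         if three[i%10] == result:
--             score[2] += 1
--
--     for i in range(len(score)):
--         if max(score) == score[i]: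
--             answer.append(i+1)
--     return answer
-- ===== SOURCE B (Python) =====
-- def solution(answers):
--     patterns = [[1, 2, 3, 4, 5],
--                 [2, 1, 2, 3, 2, 4, 2, 5],
--                 [3, 3, 1, 1, 2, 2, 4, 4, 5, 5]]
--     # Bucket the answers by (position mod 40, value): 40 = lcm of the pattern
--     # lengths, so every pattern is constant on each residue class mod 40.
--     cnt = {}
--     for i, a in enumerate(answers):
--         key = (i % 40, a)
--         cnt[key] = cnt.get(key, 0) + 1
--     # Each score is a fixed 40-term lookup sum, independent of len(answers).
--     score = [sum(cnt.get((r, p[r % len(p)]), 0) for r in range(40))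
--              for p in patterns]
--     best = max(score)
--     return [k + 1 for k, s in enumerate(score) if s == best]
-- ===== Notes on version B (the rewrite author's own statement) =====
-- stated objective: alternative
-- what changed: Instead of comparing every answer against each pattern, B buckets the answers once into a dict keyed by (index mod 40, value) -- 40 being the lcm of the three pattern lengths, on which each pattern is constant -- and then computes each score as a fixed 40-term sum of dict lookups; the best indices are taken from the enumerated score list.
import Mathlib
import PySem

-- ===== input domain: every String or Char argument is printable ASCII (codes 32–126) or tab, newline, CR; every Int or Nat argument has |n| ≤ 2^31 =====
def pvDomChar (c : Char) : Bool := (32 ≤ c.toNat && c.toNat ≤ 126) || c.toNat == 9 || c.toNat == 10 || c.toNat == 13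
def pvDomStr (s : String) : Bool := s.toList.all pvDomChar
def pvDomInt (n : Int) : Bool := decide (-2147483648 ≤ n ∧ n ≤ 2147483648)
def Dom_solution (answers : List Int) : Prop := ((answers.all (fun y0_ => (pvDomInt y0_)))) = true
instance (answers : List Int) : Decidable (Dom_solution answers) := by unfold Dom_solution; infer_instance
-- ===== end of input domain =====

-- B replaces A's per-answer three-way comparison loop by a residue-bucketing dict
-- (keys (i mod 40, value), 40 = lcm of the pattern lengths) followed by a fixed
-- 40-term lookup sum per pattern (objective: alternative).


-- ===== PORT A =====
-- loop body of A's combined for-loop (one cell of 'score' per pattern)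
def pvStep (one two three : List Int) (st : Int × Int × Int) (p : Int × Int) : Int × Int × Int :=
  let s1 := if PySem.List.pyGetD one (PySem.Int.mod p.1 5) 0 = p.2 then st.1 + 1 else st.1
  let s2 := if PySem.List.pyGetD two (PySem.Int.mod p.1 8) 0 = p.2 then st.2.1 + 1 else st.2.1
  let s3 := if PySem.List.pyGetD three (PySem.Int.mod p.1 10) 0 = p.2 then st.2.2 + 1 else st.2.2
  (s1, s2, s3)

def solution (answers : List Int) : List Int :=
  let one : List Int := [1, 2, 3, 4, 5]
  let two : List Int := [2, 1, 2, 3, 2, 4, 2, 5]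
  let three : List Int := [3, 3, 1, 1, 2, 2, 4, 4, 5, 5]
  -- score = [0,0,0] mutated cell by cell -> triple accumulator
  let score : Int × Int × Int :=
    (PySem.List.enumerate answers).foldl (pvStep one two three) (0, 0, 0)
  let scoreL : List Int := [score.1, score.2.1, score.2.2]
  -- for i in range(len(score)): if max(score) == score[i]: answer.append(i+1)
  (PySem.List.pyRange 0 (scoreL.length : Int) 1).foldl
    (fun answer i =>
      if (PySem.List.max? scoreL id).getD 0 = PySem.List.pyGetD scoreL i 0 then answer ++ [i + 1]
      else answer)
    []

-- ===== PORT B =====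
def solution_alt (answers : List Int) : List Int :=
  let patterns : List (List Int) := [[1, 2, 3, 4, 5], [2, 1, 2, 3, 2, 4, 2, 5], [3, 3, 1, 1, 2, 2, 4, 4, 5, 5]]
  -- cnt[(i % 40, a)] += 1
  let cnt : PySem.Dict (Int × Int) Int :=
    (PySem.List.enumerate answers).foldl
      (fun d q =>
        let key : Int × Int := (PySem.Int.mod q.1 40, q.2)
        d.insert key (d.getD key 0 + 1))
      PySem.Dict.empty
  -- score = [sum(cnt.get((r, p[r % len(p)]), 0) for r in range(40)) for p in patterns]
  let score : List Int := patterns.map (fun p =>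
    (PySem.List.pyRange 0 40 1).foldl
      (fun s r => s + cnt.getD (r, PySem.List.pyGetD p (PySem.Int.mod r (p.length : Int)) 0) 0) 0)
  let best : Int := (PySem.List.max? score id).getD 0
  ((PySem.List.enumerate score).filter (fun q => q.2 == best)).map (fun q => q.1 + 1)

-- ===== PRECONDITION & SPEC =====
def Spec_solution (answers : List Int) (out : List Int) : Prop := out = solution_alt answers
instance (answers : List Int) (out : List Int) : Decidable (Spec_solution answers out) := by unfold Spec_solution; infer_instance

-- ===== CLAIM (what is proved, stated in full; the proofs are below) =====
def Claim_equal_solution : Prop := ∀ (answers : List Int), Dom_solution answers → Spec_solution answers (solution answers)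

-- ===== LEMMAS AND PROOFS =====

-- A's combined loop computes, cell by cell, the three independent counts.
theorem pv_fold_counts (one two three : List Int) (l : List Int) (s : Int) (a b c : Int) :
    (PySem.List.enumerate l s).foldl (pvStep one two three) (a, b, c)
    = (a + ((PySem.List.enumerate l s).countP
            (fun q => PySem.List.pyGetD one (PySem.Int.mod q.1 5) 0 == q.2) : Int),
       b + ((PySem.List.enumerate l s).countP
            (fun q => PySem.List.pyGetD two (PySem.Int.mod q.1 8) 0 == q.2) : Int),
       c + ((PySem.List.enumerate l s).countP
            (fun q => PySem.List.pyGetD three (PySem.Int.mod q.1 10) 0 == q.2) : Int)) := by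
  induction l generalizing s a b c with
  | nil => simp [PySem.List.enumerate_nil]
  | cons x xs ih =>
      simp only [PySem.List.enumerate_cons, List.foldl_cons, List.countP_cons]
      rw [show pvStep one two three (a, b, c) (s, x) =
            ((if PySem.List.pyGetD one (PySem.Int.mod s 5) 0 = x then a + 1 else a),
             (if PySem.List.pyGetD two (PySem.Int.mod s 8) 0 = x then b + 1 else b),
             (if PySem.List.pyGetD three (PySem.Int.mod s 10) 0 = x then c + 1 else c)) from rfl,
          ih]
      split_ifs <;> simp_all <;> omega

-- Σ over a nodup list avoiding m of the matching indicator is 0.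
theorem pv_sum_zero (v : Int → Int) (m w : Int) (R : List Int) (hm : m ∉ R) :
    (R.map (fun r => if (m, w) = (r, v r) then (1 : Int) else 0)).sum = 0 := by
  induction R with
  | nil => simp
  | cons r R ih =>
      have hr : m ≠ r := fun h => hm (h ▸ List.mem_cons_self)
      rw [List.map_cons, List.sum_cons, ih (fun h => hm (List.mem_cons_of_mem _ h))]
      simp [Prod.ext_iff, hr]

-- Σ over a nodup list containing m of the matching indicator collapses to position m.
theorem pv_sum_single (v : Int → Int) (m w : Int) (R : List Int)
    (hnd : R.Nodup) (hm : m ∈ R) :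
    (R.map (fun r => if (m, w) = (r, v r) then (1 : Int) else 0)).sum
    = if w = v m then 1 else 0 := by
  induction R with
  | nil => cases hm
  | cons r R ih =>
      rcases List.mem_cons.mp hm with h | h
      · subst h
        have hnot : m ∉ R := (List.nodup_cons.mp hnd).1
        rw [List.map_cons, List.sum_cons, pv_sum_zero v m w R hnot]
        simp [Prod.ext_iff]
      · have hr : m ≠ r := fun he => ((List.nodup_cons.mp hnd).1 (he ▸ h))
        rw [List.map_cons, List.sum_cons, ih (List.nodup_cons.mp hnd).2 h]
        simp [Prod.ext_iff, hr]

-- The fixed 40-term sum of residue-bucket counts equals the direct match count.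
theorem pv_sum_counts (v u : Int → Int) (hcomp : ∀ i : Int, v (PySem.Int.mod i 40) = u i)
    (l : List (Int × Int)) :
    ((PySem.List.pyRange 0 40 1).map (fun r =>
        ((l.map (fun q => (PySem.Int.mod q.1 40, q.2))).count (r, v r) : Int))).sum
    = (l.countP (fun q => u q.1 == q.2) : Int) := by
  induction l with
  | nil => simp
  | cons x l ih =>
      have hcount : ∀ r : Int,
          ((List.map (fun q : Int × Int => (PySem.Int.mod q.1 40, q.2)) (x :: l)).count (r, v r) : Int)
          = ((List.map (fun q : Int × Int => (PySem.Int.mod q.1 40, q.2)) l).count (r, v r) : Int)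
            + (if ((PySem.Int.mod x.1 40, x.2) : Int × Int) = (r, v r) then (1 : Int) else 0) := by
        intro r
        rw [List.map_cons, List.count_cons]
        push_cast
        simp [beq_iff_eq]
      calc ((PySem.List.pyRange 0 40 1).map (fun r =>
              ((List.map (fun q : Int × Int => (PySem.Int.mod q.1 40, q.2)) (x :: l)).count (r, v r) : Int))).sum
          = ((PySem.List.pyRange 0 40 1).map (fun r =>
              ((List.map (fun q : Int × Int => (PySem.Int.mod q.1 40, q.2)) l).count (r, v r) : Int)
              + (if ((PySem.Int.mod x.1 40, x.2) : Int × Int) = (r, v r) then (1 : Int) else 0))).sum := by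
            exact congrArg List.sum (List.map_congr_left (fun r _ => hcount r))
        _ = (l.countP (fun q => u q.1 == q.2) : Int)
              + (if x.2 = v (PySem.Int.mod x.1 40) then 1 else 0) := by
            rw [PySem.List.sum_map_add_int, ih,
                pv_sum_single v (PySem.Int.mod x.1 40) x.2 _ (by decide)
                  (PySem.List.mem_pyRange_one.mpr
                    ⟨PySem.Int.mod_nonneg x.1 (by norm_num), PySem.Int.mod_lt x.1 (by norm_num)⟩)]
        _ = ((x :: l).countP (fun q => u q.1 == q.2) : Int) := by
            rw [List.countP_cons, hcomp x.1]
            push_cast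
            by_cases h : u x.1 = x.2
            · simp [h]
            · simp only [h, if_false, beq_iff_eq]
              rw [if_neg (fun he => h he.symm)]

-- (i % 40) % L = i % L for the three pattern lengths (L divides 40).
theorem pv_mod_mod (i L : Int) (hL : 0 < L) (hd : L ∣ 40) :
    PySem.Int.mod (PySem.Int.mod i 40) L = PySem.Int.mod i L := by
  rw [PySem.Int.mod_eq_emod_of_pos hL, PySem.Int.mod_eq_emod_of_pos hL,
      PySem.Int.mod_eq_emod_of_pos (show (0:Int) < 40 by norm_num),
      Int.emod_emod_of_dvd i hd]

-- A's final index loop over [a,b,c] equals B's filter/map comprehension.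
set_option maxRecDepth 4096 in
theorem pv_final (a b c m : Int) :
    (PySem.List.pyRange 0 (([a, b, c] : List Int).length : Int) 1).foldl
      (fun (answer : List Int) i =>
        if m = PySem.List.pyGetD [a, b, c] i 0 then answer ++ [i + 1] else answer)
      []
    = ((PySem.List.enumerate [a, b, c]).filter (fun q => q.2 == m)).map (fun q => q.1 + 1) := by
  have h3 : (([a, b, c] : List Int).length : Int) = 3 := by simp
  have hr : PySem.List.pyRange 0 3 1 = [(0 : Int), 1, 2] := by decide
  rw [h3, hr]
  have he : PySem.List.enumerate [a, b, c] = [((0 : Int), a), (1, b), (2, c)] := by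
    simp [PySem.List.enumerate_cons, PySem.List.enumerate_nil]
  rw [he]
  have g0 : PySem.List.pyGetD [a, b, c] (0 : Int) 0 = a := by simp [pysem]
  have g1 : PySem.List.pyGetD [a, b, c] (1 : Int) 0 = b := by simp [pysem]
  have g2 : PySem.List.pyGetD [a, b, c] (2 : Int) 0 = c := by simp [pysem]
  simp only [List.foldl_cons, List.foldl_nil, List.filter_cons, List.filter_nil, g0, g1, g2]
  clear h3 hr he g0 g1 g2
  simp only [beq_iff_eq]
  split_ifs <;> first | omega | simp

-- B's per-pattern lookup-sum equals the direct match count over the answers.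
theorem pv_alt_score (answers : List Int) (p : List Int) (L : Int)
    (hlen : ((p.length : Int)) = L) (hL : 0 < L) (hd : L ∣ 40) :
    (PySem.List.pyRange 0 40 1).foldl
      (fun s r => s +
        (((PySem.List.enumerate answers).foldl
            (fun d q =>
              let key : Int × Int := (PySem.Int.mod q.1 40, q.2)
              d.insert key (d.getD key 0 + 1))
            PySem.Dict.empty).getD
          (r, PySem.List.pyGetD p (PySem.Int.mod r (p.length : Int)) 0) 0)) 0
    = ((PySem.List.enumerate answers).countP
        (fun q => PySem.List.pyGetD p (PySem.Int.mod q.1 L) 0 == q.2) : Int) := by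
  have hfold :
      (PySem.List.enumerate answers).foldl
        (fun d q =>
          let key : Int × Int := (PySem.Int.mod q.1 40, q.2)
          d.insert key (d.getD key 0 + 1))
        PySem.Dict.empty
      = PySem.Dict.counter
          ((PySem.List.enumerate answers).map (fun q => (PySem.Int.mod q.1 40, q.2))) := by
    rw [← PySem.Dict.foldl_insert_getD_add_one_eq_counter, List.foldl_map]
  rw [hfold, PySem.List.foldl_add, zero_add]
  have hgetD : ∀ r : Int,
      (PySem.Dict.counter
          ((PySem.List.enumerate answers).map (fun q => (PySem.Int.mod q.1 40, q.2)))).getD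
        (r, PySem.List.pyGetD p (PySem.Int.mod r (p.length : Int)) 0) 0
      = (((PySem.List.enumerate answers).map (fun q => (PySem.Int.mod q.1 40, q.2))).count
          (r, PySem.List.pyGetD p (PySem.Int.mod r L) 0) : Int) := by
    intro r
    rw [hlen, PySem.Dict.getD_counter]
  rw [List.map_congr_left (fun r _ => hgetD r)]
  exact pv_sum_counts
    (fun r => PySem.List.pyGetD p (PySem.Int.mod r L) 0)
    (fun i => PySem.List.pyGetD p (PySem.Int.mod i L) 0)
    (fun i => by
      show PySem.List.pyGetD p (PySem.Int.mod (PySem.Int.mod i 40) L) 0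
            = PySem.List.pyGetD p (PySem.Int.mod i L) 0
      rw [pv_mod_mod i L hL hd]) _

-- ===== VERDICT (by name: the statement is the Claim_ definition above) =====
theorem solution_spec : Claim_equal_solution := by
  intro answers _
  show solution answers = solution_alt answers
  unfold solution solution_alt
  simp only [pv_fold_counts, zero_add, List.map_cons, List.map_nil,
    pv_alt_score answers [1, 2, 3, 4, 5] 5 (by simp) (by norm_num) (by norm_num),
    pv_alt_score answers [2, 1, 2, 3, 2, 4, 2, 5] 8 (by simp) (by norm_num) (by norm_num),
    pv_alt_score answers [3, 3, 1, 1, 2, 2, 4, 4, 5, 5] 10 (by simp) (by norm_num) (by norm_num)]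
  exact pv_final _ _ _ _
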